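-- pv_equiv track=rewrite | github.com/RepolloDev/Problemas-del-Juez-Patito | 1000-1200/1007_Pipo_el_payaso.py | max_prefix
-- ===== SOURCE A (Python) =====
-- def max_prefix(words):
--     """
--     La función recibe una LISTA de palabras, crea un diccionario con la cantidad de palabras que comienzan con la misma letra y retorna el máximo valor de palabras que comienzan con la misma letra
--     """
--     prefix = {}
--     for word in words:
--         if word[0] in prefix:
--             prefix[word[0]] += 1
--         else:
--             prefix[word[0]] = 1
--     return max(prefix.values())
-- ===== SOURCE B (Python) =====
-- def max_prefix(words):
--     firsts = sorted(w[0] for w in words)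
--     best = 0
--     run = 0
--     prev = None
--     for c in firsts:
--         if c == prev:
--             run += 1
--         else:
--             run = 1
--             prev = c
--         best = max(best, run)
--     return best
-- ===== Notes on version B (the rewrite author's own statement) =====
-- stated objective: alternative
-- what changed: B replaces A's dict-of-counters entirely: it sorts the first letters and scans the sorted list once, tracking the current run length and the best run seen, since in a sorted list the max run of equal letters is the max count.
import Mathlib
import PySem

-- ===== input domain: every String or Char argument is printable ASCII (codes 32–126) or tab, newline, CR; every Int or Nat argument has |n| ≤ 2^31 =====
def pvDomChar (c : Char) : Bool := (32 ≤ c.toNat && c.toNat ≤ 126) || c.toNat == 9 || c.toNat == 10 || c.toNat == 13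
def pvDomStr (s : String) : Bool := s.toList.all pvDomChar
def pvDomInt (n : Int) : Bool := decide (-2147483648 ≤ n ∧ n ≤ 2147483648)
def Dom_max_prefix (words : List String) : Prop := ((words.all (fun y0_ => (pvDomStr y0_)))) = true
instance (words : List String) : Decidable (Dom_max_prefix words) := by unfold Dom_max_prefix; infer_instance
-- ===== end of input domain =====

-- B sorts the first letters and takes the longest run of equal letters in one scan,
-- instead of A's dict of per-letter counters ('alternative': different algorithm, not faster).
-- Pre_ excludes the empty list (A raises ValueError) and empty-string words (IndexError).

-- ===== PORT A =====
def max_prefix (words : List String) : Int :=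
  let pref := words.foldl (fun d word =>
    match PySem.Str.pyGet? word 0 with
    | none => d            -- word[0] raises IndexError: excluded by Pre_
    | some c =>
      if d.contains c then d.insert c (d.getD c 0 + 1)
      else d.insert c 1) PySem.Dict.empty
  match PySem.List.max? pref.values (fun v => v) with
  | some m => m
  | none => 0              -- max([]) raises ValueError: excluded by Pre_

-- ===== PORT B =====
-- one step of B's loop over the sorted first letters; state = (best, run, prev)
def pvStepB (st : Int × Int × Option Char) (c : Char) : Int × Int × Option Char :=
  if some c = st.2.2 then (max st.1 (st.2.1 + 1), st.2.1 + 1, st.2.2)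
  else (max st.1 1, 1, some c)

def max_prefix_alt (words : List String) : Int :=
  let firsts := PySem.List.sorted (words.map (fun w => (PySem.Str.pyGet? w 0).getD ' ')) (fun c => c) false
  (firsts.foldl pvStepB (0, 0, none)).1

-- ===== PRECONDITION & SPEC =====
-- Pre_ excludes exactly the inputs where the Python A raises: the empty list (ValueError
-- from max of no values) and lists containing an empty string (IndexError from word[0]).
def Pre_max_prefix (words : List String) : Prop :=
  words ≠ [] ∧ ∀ w ∈ words, w.toList ≠ []
instance (words : List String) : Decidable (Pre_max_prefix words) := by unfold Pre_max_prefix; infer_instance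
def pvWitness_max_prefix : List String := (["ana", "bob", "art"])

def Spec_max_prefix (words : List String) (out : Int) : Prop := out = max_prefix_alt words
instance (words : List String) (out : Int) : Decidable (Spec_max_prefix words out) := by unfold Spec_max_prefix; infer_instance

-- ===== CLAIM (what is proved, stated in full; the proofs are below) =====
def Claim_equal_max_prefix : Prop := ∀ (words : List String), Dom_max_prefix words → Pre_max_prefix words → Spec_max_prefix words (max_prefix words)

-- ===== LEMMAS AND PROOFS =====

-- A's dict loop, on nonempty words, is the standard counter fold over the first characters.
theorem pv_fold_eq (words : List String) (h : ∀ w ∈ words, w.toList ≠ []) (d : PySem.Dict Char Int) :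
    words.foldl (fun d word =>
      match PySem.Str.pyGet? word 0 with
      | none => d
      | some c =>
        if d.contains c then d.insert c (d.getD c 0 + 1)
        else d.insert c 1) d
    = (words.map (fun w => (PySem.Str.pyGet? w 0).getD ' ')).foldl
        (fun d c => d.insert c (d.getD c 0 + 1)) d := by
  induction words generalizing d with
  | nil => rfl
  | cons w ws ih =>
    obtain ⟨c, cs, hw⟩ := List.exists_cons_of_ne_nil (h w (by simp))
    have hget : PySem.Str.pyGet? w 0 = some c := by simp [hw]
    simp only [List.foldl_cons, List.map_cons, hget, Option.getD_some]
    rw [ih (fun w hwmem => h w (by simp [hwmem]))]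
    congr 1
    by_cases hc : d.contains c
    · simp [hc]
    · simp only [hc]
      rw [PySem.Dict.getD_of_not_contains d 0 (by simpa using hc)]
      simp

-- a sorted list starting with c is a block of c's followed by a c-free sorted remainder
theorem pv_sorted_decomp : ∀ (T S : List Char) (c : Char), S.Pairwise (· ≤ ·) → S = c :: T →
    ∃ k R, S = List.replicate k c ++ R ∧ 1 ≤ k ∧ c ∉ R ∧ R.Pairwise (· ≤ ·) := by
  intro T
  induction T with
  | nil => exact fun S c _ hS => ⟨1, [], by simp [hS], le_refl 1, by simp, by simp⟩
  | cons d T' ih =>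
    intro S c hp hS
    subst hS
    rcases List.pairwise_cons.mp hp with ⟨hle, hpT⟩
    by_cases hdc : d = c
    · subst hdc
      obtain ⟨k, R, hdec, hk, hnR, hpR⟩ := ih (d :: T') d hpT rfl
      exact ⟨k + 1, R, by rw [List.replicate_succ, List.cons_append, ← hdec],
        by omega, hnR, hpR⟩
    · refine ⟨1, d :: T', by simp, le_refl 1, ?_, hpT⟩
      intro hmem
      rcases List.pairwise_cons.mp hpT with ⟨hled, _⟩
      rcases List.mem_cons.mp hmem with h | h
      · exact hdc h.symm
      · have h1 : c ≤ d := hle d (by simp)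
        have h2 : d ≤ c := hled c h
        exact hdc (le_antisymm h2 h1)

-- B's scan over a block of equal letters
theorem pv_scan_replicate (c : Char) (n : Nat) (hn : 1 ≤ n) (b r : Int) :
    (List.replicate n c).foldl pvStepB (b, r, some c) = (max b (r + n), r + n, some c) := by
  induction n generalizing b r with
  | zero => omega
  | succ m ihm =>
    rw [List.replicate_succ, List.foldl_cons]
    have hstep : pvStepB (b, r, some c) c = (max b (r + 1), r + 1, some c) := by
      simp [pvStepB]
    rw [hstep]
    rcases Nat.eq_zero_or_pos m with h | h
    · subst h
      simp only [List.replicate_zero, List.foldl_nil, Prod.mk.injEq]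
      exact ⟨by omega, by omega, trivial⟩
    · rw [ihm h]
      simp only [Prod.mk.injEq]
      exact ⟨by omega, by omega, trivial⟩

-- after a block, a prev letter absent from the rest does not influence the final best
theorem pv_scan_cont (c : Char) (R : List Char) (hnc : c ∉ R) (b r r' : Int) :
    (R.foldl pvStepB (b, r, some c)).1 = (R.foldl pvStepB (b, r', none)).1 := by
  cases R with
  | nil => rfl
  | cons d R' =>
    have hdc : d ≠ c := fun h => hnc (by simp [h])
    simp only [List.foldl_cons, pvStepB]
    rw [if_neg (by simp [hdc]), if_neg (by simp)]

-- B's scan computes the maximum multiplicity of a sorted nonempty list (joined with the start best b)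
theorem pv_scan_spec (S : List Char) (hp : S.Pairwise (· ≤ ·)) (hne : S ≠ []) (b : Int)
    (hb : 0 ≤ b) :
    (∃ c ∈ S, (S.foldl pvStepB (b, 0, none)).1 = max b (S.count c)) ∧
    (∀ c ∈ S, (S.count c : Int) ≤ (S.foldl pvStepB (b, 0, none)).1) ∧
    b ≤ (S.foldl pvStepB (b, 0, none)).1 := by
  induction hlen : S.length using Nat.strong_induction_on generalizing S b with
  | _ n ih =>
  obtain ⟨c, T, hS⟩ := List.exists_cons_of_ne_nil hne
  obtain ⟨k, R, hdec, hk, hnR, hpR⟩ := pv_sorted_decomp T S c hp hS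
  have hcount : S.count c = k := by
    simp [hdec, List.count_append,
      List.count_eq_zero_of_not_mem hnR]
  have hcountR : ∀ d ∈ R, S.count d = R.count d := by
    intro d hd
    have hdc : c ≠ d := fun h => hnR (h ▸ hd)
    simp [hdec, List.count_append, List.count_replicate, hdc]
  have hfold : S.foldl pvStepB (b, 0, none) =
      R.foldl pvStepB (max b k, (k : Int), some c) := by
    rw [hdec, List.foldl_append]
    congr 1
    obtain ⟨m, rfl⟩ : ∃ m, k = m + 1 := ⟨k - 1, by omega⟩
    rw [List.replicate_succ, List.foldl_cons]
    have h0 : pvStepB (b, 0, none) c = (max b 1, 1, some c) := by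
      simp [pvStepB]
    rw [h0]
    rcases Nat.eq_zero_or_pos m with h | h
    · subst h
      simp only [List.replicate_zero, List.foldl_nil, Prod.mk.injEq]
      exact ⟨by omega, by omega, trivial⟩
    · rw [pv_scan_replicate c m h]
      simp only [Prod.mk.injEq]
      exact ⟨by omega, by omega, trivial⟩
  cases hR : R with
  | nil =>
    subst hR
    simp only [List.foldl_nil] at hfold
    refine ⟨⟨c, by simp [hS], ?_⟩, ?_, ?_⟩
    · rw [hfold, hcount]
    · intro d hd
      have hdc : d = c := by
        rw [hdec] at hd
        exact (by simpa using hd : ¬k = 0 ∧ d = c).2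
      rw [hdc, hcount, hfold]
      show (k : Int) ≤ max b k
      omega
    · rw [hfold]
      show b ≤ max b (k : Int)
      omega
  | cons e R' =>
    have hRne : R ≠ [] := by simp [hR]
    have hRlen : R.length < n := by
      rw [← hlen, hdec]
      simp only [List.length_append, List.length_replicate]
      omega
    have hcont := pv_scan_cont c R hnR (max b k) (k : Int) 0
    obtain ⟨⟨d, hdR, hdv⟩, hub, hlb⟩ := ih R.length hRlen R hpR hRne (max b k)
      (le_trans hb (le_max_left _ _)) rfl
    have hveq : (S.foldl pvStepB (b, 0, none)).1 = (R.foldl pvStepB (max b k, 0, none)).1 := by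
      rw [hfold, hcont]
    refine ⟨?_, ?_, ?_⟩
    · rcases le_total (R.count d) k with hle | hle
      · refine ⟨c, by simp [hS], ?_⟩
        rw [hveq, hdv, hcount]
        omega
      · refine ⟨d, by rw [hdec]; exact List.mem_append_right _ hdR, ?_⟩
        rw [hveq, hdv, hcountR d hdR]
        omega
    · intro x hx
      rw [hveq]
      rw [hdec] at hx
      rcases List.mem_append.mp hx with hx | hx
      · have hxc : x = c := List.eq_of_mem_replicate hx
        rw [hxc, hcount]
        omega
      · rw [hcountR x hx]
        exact hub x hx
    · rw [hveq]
      omega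

theorem max_prefix_spec : Claim_equal_max_prefix := by
  intro words _ hpre
  unfold Spec_max_prefix max_prefix max_prefix_alt
  rw [pv_fold_eq words hpre.2, PySem.Dict.foldl_insert_getD_add_one_eq_counter]
  set L := words.map (fun w => (PySem.Str.pyGet? w 0).getD ' ') with hL
  set S := PySem.List.sorted L (fun c => c) false with hSdef
  have hperm : S.Perm L := PySem.List.sorted_perm L (fun c => c) false
  have hLne : L ≠ [] := by
    intro h
    exact hpre.1 (List.map_eq_nil_iff.mp h)
  have hSne : S ≠ [] := fun h => hLne ((PySem.List.sorted_eq_nil_iff L (fun c => c) false).mp h)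
  have hSp : S.Pairwise (· ≤ ·) := by
    have := PySem.List.sorted_pairwise L (fun c => c) (κ := Char)
    simpa using this
  -- A's value: the first maximal element of the counter's values
  have hvals : (PySem.Dict.counter L).values
      = (PySem.Set.ofList L).map (fun c => ((L.count c : Nat) : Int)) := by
    simp only [PySem.Dict.values, PySem.Dict.items_counter, List.map_map]
    rfl
  have hvne : (PySem.Dict.counter L).values ≠ [] := by
    rw [hvals]
    simp only [ne_eq, List.map_eq_nil_iff]
    intro h
    have hmem := (PySem.Set.mem_ofList L (L.head hLne)).mpr (List.head_mem hLne)
    rw [h] at hmem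
    exact (List.not_mem_nil).elim hmem
  obtain ⟨m, hm⟩ : ∃ m, PySem.List.max? ((PySem.Dict.counter L).values) (fun v => v) = some m := by
    cases hx : PySem.List.max? ((PySem.Dict.counter L).values) (fun v => v) with
    | none => exact absurd ((PySem.List.max?_eq_none_iff _ _).mp hx) hvne
    | some m => exact ⟨m, rfl⟩
  have hshow : (have pref := PySem.Dict.counter L;
      match PySem.List.max? pref.values fun v => v with
      | some m => m | none => 0) = m := by
    show (match PySem.List.max? (PySem.Dict.counter L).values fun v => v with
      | some m => m | none => 0) = m
    rw [hm]
  rw [hshow]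
  have hmmem : m ∈ (PySem.Dict.counter L).values := PySem.List.max?_mem hm
  have hmax : ∀ y ∈ (PySem.Dict.counter L).values, y ≤ m :=
    fun y hy => PySem.List.max?_isMax hm y hy
  rw [hvals] at hmmem hmax
  obtain ⟨c0, hc0, hmc0⟩ := List.mem_map.mp hmmem
  have hc0L : c0 ∈ L := (PySem.Set.mem_ofList L c0).mp hc0
  have hub : ∀ c ∈ L, (L.count c : Int) ≤ m := by
    intro c hc
    exact hmax _ (List.mem_map.mpr ⟨c, (PySem.Set.mem_ofList L c).mpr hc, rfl⟩)
  obtain ⟨⟨d, hdS, hdv⟩, hubB, _⟩ := pv_scan_spec S hSp hSne 0 (le_refl 0)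
  have hcnt : ∀ c, S.count c = L.count c := fun c => hperm.count_eq c
  have h1 : (S.foldl pvStepB (0, 0, none)).1 ≤ m := by
    rw [hdv, hcnt d]
    have := hub d (hperm.mem_iff.mp hdS)
    omega
  have h2 : m ≤ (S.foldl pvStepB (0, 0, none)).1 := by
    have := hubB c0 (hperm.mem_iff.mpr hc0L)
    rw [hcnt c0] at this
    omega
  show m = (S.foldl pvStepB (0, 0, none)).1
  omega
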